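-- pv_equiv track=rewrite | github.com/Ashiq-am/Path-of-Python | 3.Data Types/Arrays Set 1 and Set 2/Prefix Sum/Count of indices up to which prefix and suffix sum is equal for given Array/Count of indices up to which prefix and suffix sum is equal for given Array.py | equalSumPreSuf
-- ===== SOURCE A (Python) =====
-- from builtins import range
--
-- def equalSumPreSuf(arr):
--     # Initialize a variable
--     # to store the result
--     res = 0
--
--     # Initialize variables to
--     # calculate prefix and suffix sums
--     preSum = 0
--     sufSum = 0
--
--     # Length of array arr
--     length = len(arr)
--
--     # Traverse the array from right to left
--     for i in range(length - 1, -1, -1):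
--         # Add the current element
--         # into sufSum
--         sufSum += arr[i]
--
--     # Iterate the array from left to right
--     for i in range(length):
--
--         # Add the current element
--         # into preSum
--         preSum += arr[i]
--
--         # If prefix sum is equal to
--         # suffix sum then increment res by 1
--         if (preSum == sufSum):
--             # Increment the result
--             res += 1
--
--         # Subtract the value of current
--         # element arr[i] from suffix sum
--         sufSum -= arr[i]
--
--     # Return the answer
--     return res
-- ===== SOURCE B (Python) =====
-- def equalSumPreSuf(arr):
--     # Staged decomposition: materialize the full prefix-sum and suffix-sum
--     # sequences as explicit lists, then count positions where they agree.
--     pre = []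
--     s = 0
--     for x in arr:
--         s += x
--         pre.append(s)
--     suf = []
--     s = 0
--     for x in reversed(arr):
--         s += x
--         suf.append(s)
--     suf.reverse()
--     return sum(1 for p, q in zip(pre, suf) if p == q)
-- ===== Notes on version B (the rewrite author's own statement) =====
-- stated objective: alternative
-- what changed: A maintains running prefix/suffix accumulators in one index loop with in-place subtraction; B instead materializes the complete prefix-sum list and the complete suffix-sum list (built by scanning the reversed array and reversing back) and then counts matching positions in a zip.
import Mathlib
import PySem

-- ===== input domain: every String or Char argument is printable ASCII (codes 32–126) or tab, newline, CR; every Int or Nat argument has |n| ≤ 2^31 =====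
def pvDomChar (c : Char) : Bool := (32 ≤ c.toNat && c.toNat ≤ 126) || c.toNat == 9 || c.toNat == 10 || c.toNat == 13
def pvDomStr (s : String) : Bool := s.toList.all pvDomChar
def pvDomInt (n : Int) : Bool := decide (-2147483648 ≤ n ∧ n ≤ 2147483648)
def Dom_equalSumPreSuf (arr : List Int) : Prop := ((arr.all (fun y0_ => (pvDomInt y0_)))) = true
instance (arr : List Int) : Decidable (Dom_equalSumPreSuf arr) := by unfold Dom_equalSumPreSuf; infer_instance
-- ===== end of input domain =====

-- B replaces A's single accumulator loop (running suffix updated by subtraction) with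
-- staged passes that materialize the prefix-sum and suffix-sum lists and count
-- matching positions in their zip: objective = alternative decomposition, same cost.


-- ===== PORT A =====
def equalSumPreSuf (arr : List Int) : Int :=
  let length : Int := (arr.length : Int)
  -- for i in range(length-1, -1, -1): sufSum += arr[i]
  let sufSum : Int :=
    (PySem.List.pyRange (length - 1) (-1) (-1)).foldl
      (fun s i => s + PySem.List.pyGetD arr i 0) 0
  -- for i in range(length): preSum += arr[i]; if preSum == sufSum: res += 1; sufSum -= arr[i]
  let st :=
    (PySem.List.pyRange 0 length 1).foldl
      (fun (st : Int × Int × Int) i =>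
        let preSum := st.2.1 + PySem.List.pyGetD arr i 0
        let res := if preSum == st.2.2 then st.1 + 1 else st.1
        (res, preSum, st.2.2 - PySem.List.pyGetD arr i 0))
      (0, 0, sufSum)
  st.1

-- ===== PORT B =====
-- running-sum scan (Source B's append loop building a cumulative-sum list)
def pvScan (s : Int) : List Int → List Int
  | [] => []
  | x :: t => (s + x) :: pvScan (s + x) t

def equalSumPreSuf_alt (arr : List Int) : Int :=
  let pre := pvScan 0 arr
  let suf := (pvScan 0 arr.reverse).reverse
  ((((pre.zip suf).countP (fun pq => pq.1 == pq.2)) : Nat) : Int)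

-- ===== PRECONDITION & SPEC =====
def Spec_equalSumPreSuf (arr : List Int) (out : Int) : Prop := out = equalSumPreSuf_alt arr
instance (arr : List Int) (out : Int) : Decidable (Spec_equalSumPreSuf arr out) := by unfold Spec_equalSumPreSuf; infer_instance

-- ===== CLAIM (what is proved, stated in full; the proofs are below) =====
def Claim_equal_equalSumPreSuf : Prop := ∀ (arr : List Int), Dom_equalSumPreSuf arr → Spec_equalSumPreSuf arr (equalSumPreSuf arr)

-- ===== LEMMAS AND PROOFS =====

-- A's first loop computes the sum of arr.
lemma sufSum_eq_sum (arr : List Int) :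
    (PySem.List.pyRange ((arr.length : Int) - 1) (-1) (-1)).foldl
      (fun s i => s + PySem.List.pyGetD arr i 0) 0 = arr.sum := by
  rw [PySem.List.pyRange_neg_one_eq_reverse]
  rw [show ((-1 : Int) + 1) = 0 by ring, sub_add_cancel]
  have hm : ∀ (l : List Int),
      l.foldl (fun s i => s + PySem.List.pyGetD arr i 0) 0
        = (l.map (fun i => PySem.List.pyGetD arr i 0)).sum := by
    intro l; rw [List.sum_eq_foldl, List.foldl_map]
  rw [hm, List.map_reverse, List.sum_reverse,
      PySem.List.map_pyGetD_pyRange_zero']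

lemma pvScan_append (s : Int) (l m : List Int) :
    pvScan s (l ++ m) = pvScan s l ++ pvScan (s + l.sum) m := by
  induction l generalizing s with
  | nil => simp [pvScan]
  | cons x t ih => simp [pvScan, ih, add_assoc]

-- B's suffix list peels off head-first: suf (x::t) = (t.sum + x) :: suf t.
lemma suf_cons (x : Int) (t : List Int) :
    (pvScan 0 (x :: t).reverse).reverse
      = (t.sum + x) :: (pvScan 0 t.reverse).reverse := by
  have : (x :: t).reverse = t.reverse ++ [x] := by simp
  rw [this, pvScan_append]
  simp [pvScan]

-- Invariant: A's element-wise loop (with suffix state = rest.sum + pending) counts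
-- exactly the matching positions of B's zip.
lemma loop_eq_count (xs : List Int) :
    ∀ (res p : Int),
    (xs.foldl
      (fun (st : Int × Int × Int) x =>
        let preSum := st.2.1 + x
        let r := if preSum == st.2.2 then st.1 + 1 else st.1
        (r, preSum, st.2.2 - x))
      (res, p, xs.sum)).1
    = res + (((pvScan p xs).zip ((pvScan 0 xs.reverse).reverse)).countP
        (fun pq => pq.1 == pq.2) : Nat) := by
  induction xs with
  | nil => intro res p; simp [pvScan]
  | cons x t ih =>
      intro res p
      simp only [List.foldl_cons, List.sum_cons, pvScan, suf_cons, List.zip_cons_cons,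
        List.countP_cons]
      have hsum : x + t.sum - x = t.sum := by ring
      rw [hsum, ih]
      have hc : ((p + x) == (x + t.sum)) = ((p + x) == (t.sum + x)) := by
        rw [add_comm x t.sum]
      by_cases h : (p + x) = (t.sum + x)
      · simp [h, add_comm x t.sum]
        ring
      · have h' : ¬ (p + x) = (x + t.sum) := by omega
        simp [h, h']

-- ===== VERDICT (by name: the statement is the Claim_ definition above) =====
theorem equalSumPreSuf_spec : Claim_equal_equalSumPreSuf := by
  intro arr _
  unfold Spec_equalSumPreSuf equalSumPreSuf equalSumPreSuf_alt
  simp only [sufSum_eq_sum]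
  have h := PySem.List.foldl_pyRange_zero_pyGetD' (xs := arr) (d := (0 : Int))
      (f := fun (st : Int × Int × Int) x =>
        let preSum := st.2.1 + x
        let r := if preSum == st.2.2 then st.1 + 1 else st.1
        (r, preSum, st.2.2 - x))
      (init := ((0 : Int), (0 : Int), arr.sum))
  simp only at h ⊢
  rw [h, loop_eq_count arr 0 0]
  simp
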